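-- pv_equiv track=rewrite | github.com/Verus121/hashcode | pizza2022/tester.py | clean_customer_data
-- ===== SOURCE A (Python) =====
-- def get_clean_customer_lines(raw_customer_lines):
--     clean_customer_lines = []
--     for raw_customer_line in raw_customer_lines:
--         raw_customer_list = raw_customer_line.split()
--         raw_customer_list.pop(0)
--         clean_customer_lines.append(raw_customer_list)
--     return clean_customer_lines
--
-- def clean_customer_data(raw_customer_lines):
--     clean_customer_lines = get_clean_customer_lines(raw_customer_lines)
--     customer_likes_data = clean_customer_lines[::2]
--     customer_dislikes_data = clean_customer_lines[1::2]
--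
--     customer_data = []
--     for i in range(0, len(customer_likes_data)):
--         customer_data.append([customer_likes_data[i], customer_dislikes_data[i]])
--     return customer_data
-- ===== SOURCE B (Python) =====
-- def clean_customer_data(raw_customer_lines):
--     customer_data = []
--     for i in range(0, len(raw_customer_lines), 2):
--         likes = raw_customer_lines[i].split()[1:]
--         dislikes = raw_customer_lines[i + 1].split()[1:]
--         customer_data.append([likes, dislikes])
--     return customer_data
-- ===== Notes on version B (the rewrite author's own statement) =====
-- stated objective: simpler
-- what changed: Replaces A's three-pass structure (clean every line, take two step-2 slices, then re-index both slices in a pairing loop) by a single fused pass over the raw lines two at a time, cleaning each pair in place with split()[1:].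
import Mathlib
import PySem

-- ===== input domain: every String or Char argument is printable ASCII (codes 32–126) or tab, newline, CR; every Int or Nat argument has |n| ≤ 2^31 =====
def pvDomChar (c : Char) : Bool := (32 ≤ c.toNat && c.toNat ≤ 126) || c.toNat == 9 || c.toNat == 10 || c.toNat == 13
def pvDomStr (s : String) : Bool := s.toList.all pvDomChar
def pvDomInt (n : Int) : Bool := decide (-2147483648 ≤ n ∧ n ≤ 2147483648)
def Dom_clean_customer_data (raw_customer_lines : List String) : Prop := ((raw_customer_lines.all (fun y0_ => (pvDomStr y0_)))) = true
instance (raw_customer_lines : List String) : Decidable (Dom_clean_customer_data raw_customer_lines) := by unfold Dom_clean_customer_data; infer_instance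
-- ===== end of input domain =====

-- B replaces A's three passes (clean every line, two step-2 slices, an index loop re-pairing them)
-- by one fused pass over the raw lines two at a time; objective: simpler.

-- ===== PORT A =====
-- raw_customer_list.pop(0): `none` is where Python raises IndexError (no-token line), excluded by Pre_
def pvPopFirst (ws : List String) : List String :=
  match PySem.List.pop? ws 0 with
  | some r => r.2
  | none => ws

def get_clean_customer_lines (raw_customer_lines : List String) : List (List String) :=
  raw_customer_lines.foldl (fun acc l => acc ++ [pvPopFirst (PySem.Str.split₀ l)]) []

-- the `for i in range(0, len(customer_likes_data))` loop of A; the pyGetD default [] is never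
-- reached inside Pre_ (Python raises IndexError on an odd number of lines, excluded by Pre_)
def pvPairLoop (likes dislikes : List (List String)) : List (List (List String)) :=
  (PySem.List.pyRange 0 (likes.length : Int) 1).foldl
    (fun acc i => acc ++ [[PySem.List.pyGetD likes i [], PySem.List.pyGetD dislikes i []]]) []

def clean_customer_data (raw_customer_lines : List String) : List (List (List String)) :=
  let clean_customer_lines := get_clean_customer_lines raw_customer_lines
  let customer_likes_data := (PySem.List.slice? clean_customer_lines none none 2).getD []
  let customer_dislikes_data := (PySem.List.slice? clean_customer_lines (some 1) none 2).getD []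
  pvPairLoop customer_likes_data customer_dislikes_data

-- ===== PORT B =====
-- one fused pass: the raw lines two at a time, each cleaned by split()[1:]
def clean_customer_data_alt (raw_customer_lines : List String) : List (List (List String)) :=
  match raw_customer_lines with
  | a :: b :: rest =>
      [PySem.List.slice (PySem.Str.split₀ a) (some 1) none,
       PySem.List.slice (PySem.Str.split₀ b) (some 1) none] :: clean_customer_data_alt rest
  | _ => []

-- ===== PRECONDITION & SPEC =====
-- Pre_ excludes exactly the inputs on which A raises IndexError: an odd number of lines
-- (customer_dislikes_data runs out) or a line with no tokens (pop(0) on an empty list).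
def Pre_clean_customer_data (raw_customer_lines : List String) : Prop :=
  raw_customer_lines.length % 2 = 0 ∧ ∀ l ∈ raw_customer_lines, PySem.Str.split₀ l ≠ []
instance (raw_customer_lines : List String) : Decidable (Pre_clean_customer_data raw_customer_lines) := by
  unfold Pre_clean_customer_data; infer_instance

def pvWitness_clean_customer_data : List String := ["1 cheese onion", "2 pepper basil"]

def Spec_clean_customer_data (raw_customer_lines : List String) (out : List (List (List String))) : Prop :=
  out = clean_customer_data_alt raw_customer_lines
instance (raw_customer_lines : List String) (out : List (List (List String))) : Decidable (Spec_clean_customer_data raw_customer_lines out) := by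
  unfold Spec_clean_customer_data; infer_instance

-- ===== CLAIM (what is proved, stated in full; the proofs are below) =====
def Claim_equal_clean_customer_data : Prop := ∀ (raw_customer_lines : List String), Dom_clean_customer_data raw_customer_lines → Pre_clean_customer_data raw_customer_lines → Spec_clean_customer_data raw_customer_lines (clean_customer_data raw_customer_lines)

-- ===== LEMMAS AND PROOFS =====

lemma gcl_eq_map (raw : List String) :
    get_clean_customer_lines raw = raw.map (fun l => pvPopFirst (PySem.Str.split₀ l)) := by
  unfold get_clean_customer_lines
  rw [PySem.List.foldl_append_singleton_eq_map, List.nil_append]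

lemma slice2_nil {α : Type} : PySem.List.slice? ([] : List α) none none 2 = some [] := by
  simp [PySem.List.slice?, PySem.List.sliceIndices]

lemma slice2_nil' {α : Type} : PySem.List.slice? ([] : List α) (some 1) none 2 = some [] := by
  simp [PySem.List.slice?, PySem.List.sliceIndices]

lemma slice2_cons {α : Type} (x y : α) (r : List α) :
    PySem.List.slice? (x :: y :: r) none none 2
      = some (x :: (PySem.List.slice? r none none 2).getD []) := by
  simp [PySem.List.slice?, PySem.List.sliceIndices]
  split_ifs with h1 h2
  · have hc : (((r.length : Int) + 1 + 1 + 2 - 1) / 2).toNat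
        = (((r.length : Int) + 2 - 1) / 2).toNat + 1 := by omega
    rw [hc, List.range_succ_eq_map, List.filterMap_cons, List.filterMap_map]
    norm_num
    apply List.filterMap_congr
    intro k _
    have h3 : (2 * ((k : Int) + 1)).toNat = 2 * k + 2 := by omega
    have h4 : (2 * (k : Int)).toNat = 2 * k := by omega
    simp [h3, h4]
  · -- r = []
    have hr : r = [] := by
      cases r with
      | nil => rfl
      | cons z zs => exact absurd (by simp) h2
    subst hr
    norm_num [List.range_succ, List.filterMap_cons]
  · exact absurd (by omega) h1
  · exact absurd (by omega) h1

lemma slice2_cons' {α : Type} (x y : α) (r : List α) :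
    PySem.List.slice? (x :: y :: r) (some 1) none 2
      = some (y :: (PySem.List.slice? r (some 1) none 2).getD []) := by
  simp [PySem.List.slice?, PySem.List.sliceIndices]
  have hm1 : min (1:Int) ((r.length : Int) + 1 + 1) = 1 := by omega
  rw [hm1]
  have hC2 : (if 1 < r.length then (((r.length : Int) - min 1 (r.length : Int) + 2 - 1) / 2).toNat else 0)
      = ((r.length : Int) / 2).toNat := by split_ifs <;> omega
  have hC1 : (((r.length : Int) + 1 + 1 - 1 + 2 - 1) / 2).toNat = ((r.length : Int) / 2).toNat + 1 := by
    omega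
  rw [hC2, hC1, List.range_succ_eq_map, List.filterMap_cons, List.filterMap_map]
  norm_num
  apply List.filterMap_congr
  intro k hk
  have hk' : k < ((r.length : Int) / 2).toNat := List.mem_range.mp hk
  have h3 : ((1 : Int) + 2 * ((k : Int) + 1)).toNat = 2 * k + 3 := by omega
  have h4 : (min (1:Int) (r.length : Int) + 2 * (k : Int)).toNat = 2 * k + 1 := by omega
  simp [h3, h4]

lemma pairLoop_eq (likes dislikes : List (List String)) :
    pvPairLoop likes dislikes
      = (List.range likes.length).map (fun k => [likes.getD k [], dislikes.getD k []]) := by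
  unfold pvPairLoop
  rw [PySem.List.foldl_append_singleton_eq_map, PySem.List.pyRange_one]
  simp [List.map_map, Function.comp]

lemma range_map_cons₂ (x y : List String) (xs ys : List (List String)) :
    (List.range (xs.length + 1)).map (fun k => [(x :: xs).getD k [], (y :: ys).getD k []])
      = [x, y] :: (List.range xs.length).map (fun k => [xs.getD k [], ys.getD k []]) := by
  rw [List.range_succ_eq_map]
  simp [List.map_map, Function.comp]

lemma pvPopFirst_of_ne (ws : List String) (h : ws ≠ []) :
    pvPopFirst ws = PySem.List.slice ws (some 1) none := by
  cases ws with
  | nil => exact absurd rfl h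
  | cons w ws => simp [pvPopFirst, PySem.List.pop?_zero_cons, PySem.List.slice_from_one]

lemma A_unfold (raw : List String) :
    clean_customer_data raw
      = (List.range ((PySem.List.slice? (raw.map (fun l => pvPopFirst (PySem.Str.split₀ l))) none none 2).getD []).length).map
          (fun k => [((PySem.List.slice? (raw.map (fun l => pvPopFirst (PySem.Str.split₀ l))) none none 2).getD []).getD k [],
                     ((PySem.List.slice? (raw.map (fun l => pvPopFirst (PySem.Str.split₀ l))) (some 1) none 2).getD []).getD k []]) := by
  simp only [clean_customer_data, gcl_eq_map, pairLoop_eq]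

lemma main_eq (raw : List String) :
    (∀ l ∈ raw, PySem.Str.split₀ l ≠ []) → raw.length % 2 = 0 →
    clean_customer_data raw = clean_customer_data_alt raw := by
  induction raw using clean_customer_data_alt.induct with
  | case1 a b rest ih =>
    intro h1 h2
    have ha := h1 a (by simp)
    have hb := h1 b (by simp)
    have ihr := ih (fun l hl => h1 l (by simp [hl])) (by simp only [List.length_cons] at h2; omega)
    rw [A_unfold] at ihr ⊢
    simp only [List.map_cons]
    rw [slice2_cons, slice2_cons', Option.getD_some, Option.getD_some]
    simp only [List.length_cons]
    rw [range_map_cons₂, pvPopFirst_of_ne _ ha, pvPopFirst_of_ne _ hb]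
    simp only [clean_customer_data_alt]
    rw [ihr]
  | case2 raw hne =>
    intro h1 h2
    cases raw with
    | nil =>
      rw [A_unfold]
      simp [slice2_nil, slice2_nil', clean_customer_data_alt]
    | cons x xs =>
      cases xs with
      | nil => simp at h2
      | cons y ys => exact absurd rfl (hne x y ys)

-- ===== VERDICT (by name: the statement is the Claim_ definition above) =====
theorem clean_customer_data_spec : Claim_equal_clean_customer_data := by
  intro raw _ hpre
  unfold Spec_clean_customer_data
  exact main_eq raw hpre.2 hpre.1
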